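-- pv_equiv track=rewrite | github.com/prapeller/sandbox | algorithms_and_datastructures/webinar/less07_sorting/task_3.py | iterable_median
-- ===== SOURCE A (Python) =====
-- def iterable_median(lst):
--     for i in range(len(lst)):
--         lowers = []
--         highers = []
--         pivots = []
--         for j in range(len(lst)):
--             if lst[j] < lst[i] and i != j:
--                 lowers.append(lst[j])
--             if lst[j] > lst[i] and i != j:
--                 highers.append(lst[j])
--             if lst[j] == lst[i] and i != j:
--                 pivots.append(lst[j])
--
--         for k in range(len(pivots) + 1):
--             if len(highers) - k == len(lowers):
--                 return lst[i]
--             if len(lowers) - k == len(highers):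
--                 return lst[i]
-- ===== SOURCE B (Python) =====
-- def iterable_median(lst):
--     if not lst:
--         return None
--     s = sorted(lst)
--     n = len(s)
--     lo = s[(n - 1) // 2]
--     hi = s[n // 2]
--     return lo if lo == hi else None
-- ===== Notes on version B (the rewrite author's own statement) =====
-- stated objective: faster
-- what changed: Replaced the O(n^2) scan that rebuilds lower/higher/equal partitions for every element with a single sort followed by a check that the two middle sorted elements are equal.
import Mathlib
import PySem

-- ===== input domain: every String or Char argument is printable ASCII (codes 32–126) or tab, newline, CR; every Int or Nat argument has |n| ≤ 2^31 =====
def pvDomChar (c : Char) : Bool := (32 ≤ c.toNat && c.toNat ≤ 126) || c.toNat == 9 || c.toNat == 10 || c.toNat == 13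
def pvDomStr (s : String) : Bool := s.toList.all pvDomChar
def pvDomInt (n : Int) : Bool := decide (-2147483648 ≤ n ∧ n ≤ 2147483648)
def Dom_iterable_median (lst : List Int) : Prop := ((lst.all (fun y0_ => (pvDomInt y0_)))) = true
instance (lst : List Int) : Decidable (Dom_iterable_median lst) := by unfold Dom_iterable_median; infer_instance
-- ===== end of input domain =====

-- B replaces A's quadratic per-element partition scans by one sort plus a middle-elements check (measured asymptotically faster).

-- ===== PORT A =====
-- the inner 'for j in range(len(lst))' loop building (lowers, highers, pivots)
def imedInner (lst : List Int) (i xi : Int) (js : List Int) : List Int × List Int × List Int :=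
  js.foldl (fun (acc : List Int × List Int × List Int) j =>
    let xj := PySem.List.pyGetD lst j 0
    let acc := if xj < xi ∧ i ≠ j then (acc.1 ++ [xj], acc.2.1, acc.2.2) else acc
    let acc := if xi < xj ∧ i ≠ j then (acc.1, acc.2.1 ++ [xj], acc.2.2) else acc
    if xj = xi ∧ i ≠ j then (acc.1, acc.2.1, acc.2.2 ++ [xj]) else acc)
    ([], [], [])

-- the 'for k in range(len(pivots)+1)' loop; true = one of the two 'return lst[i]' fired
def imedKLoop (lowLen highLen : Int) : List Int → Bool
  | [] => false
  | k :: ks =>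
    if highLen - k = lowLen then true
    else if lowLen - k = highLen then true
    else imedKLoop lowLen highLen ks

-- the outer 'for i in range(len(lst))' loop with its early returns
def imedGo (lst : List Int) : List Int → Option Int
  | [] => none
  | i :: is =>
    let xi := PySem.List.pyGetD lst i 0
    let t := imedInner lst i xi (PySem.List.pyRange 0 (lst.length : Int) 1)
    if imedKLoop (t.1.length : Int) (t.2.1.length : Int)
        (PySem.List.pyRange 0 ((t.2.2.length : Int) + 1) 1) then some xi
    else imedGo lst is

def iterable_median (lst : List Int) : Option Int :=
  imedGo lst (PySem.List.pyRange 0 (lst.length : Int) 1)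

-- ===== PORT B =====
def iterable_median_alt (lst : List Int) : Option Int :=
  if lst = [] then none
  else
    let s := PySem.List.sorted lst (fun x => x) false
    let n : Int := (s.length : Int)
    let lo := PySem.List.pyGetD s (PySem.Int.floordiv (n - 1) 2) 0
    let hi := PySem.List.pyGetD s (PySem.Int.floordiv n 2) 0
    if lo = hi then some lo else none

-- ===== PRECONDITION & SPEC =====
def Spec_iterable_median (lst : List Int) (out : Option Int) : Prop := out = iterable_median_alt lst
instance (lst : List Int) (out : Option Int) : Decidable (Spec_iterable_median lst out) := by unfold Spec_iterable_median; infer_instance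

-- ===== CLAIM (what is proved, stated in full; the proofs are below) =====
def Claim_equal_iterable_median : Prop := ∀ (lst : List Int), Dom_iterable_median lst → Spec_iterable_median lst (iterable_median lst)

-- ===== LEMMAS AND PROOFS =====

-- x is a "median value" of lst: |#greater - #smaller| ≤ #equal - 1
def medQ (lst : List Int) (x : Int) : Bool :=
  decide ((lst.countP (fun y => decide (x < y)) : Int) -
            (lst.countP (fun y => decide (y < x)) : Int)
          ≤ (lst.countP (fun y => decide (y = x)) : Int) - 1 ∧
          (lst.countP (fun y => decide (y < x)) : Int) -
            (lst.countP (fun y => decide (x < y)) : Int)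
          ≤ (lst.countP (fun y => decide (y = x)) : Int) - 1)

theorem inner_len (lst : List Int) (a : Nat) (halt : a < lst.length) :
    ∀ (m : Nat), m ≤ lst.length →
    (imedInner lst (a : Int) lst[a] (PySem.List.pyRange 0 (m : Int) 1)).1.length
        = (lst.take m).countP (fun y => decide (y < lst[a])) ∧
    (imedInner lst (a : Int) lst[a] (PySem.List.pyRange 0 (m : Int) 1)).2.1.length
        = (lst.take m).countP (fun y => decide (lst[a] < y)) ∧
    (imedInner lst (a : Int) lst[a] (PySem.List.pyRange 0 (m : Int) 1)).2.2.length
        + (if a < m then 1 else 0)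
        = (lst.take m).countP (fun y => decide (y = lst[a])) := by
  intro m
  induction m with
  | zero =>
    intro _
    rw [PySem.List.pyRange_one_eq_nil (by omega)]
    simp [imedInner]
  | succ m ih =>
    intro hm1
    have hm : m < lst.length := by omega
    obtain ⟨ih1, ih2, ih3⟩ := ih (by omega)
    have hr : PySem.List.pyRange 0 ((m + 1 : Nat) : Int) 1
        = PySem.List.pyRange 0 (m : Int) 1 ++ [(m : Int)] := by
      push_cast
      exact PySem.List.pyRange_one_succ_right (by omega)
    have hstep : ∀ (js : List Int) (j : Int),
        imedInner lst (a : Int) lst[a] (js ++ [j])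
          = (let t := imedInner lst (a : Int) lst[a] js
             let xj := PySem.List.pyGetD lst j 0
             let t := if xj < lst[a] ∧ (a : Int) ≠ j then (t.1 ++ [xj], t.2.1, t.2.2) else t
             let t := if lst[a] < xj ∧ (a : Int) ≠ j then (t.1, t.2.1 ++ [xj], t.2.2) else t
             if xj = lst[a] ∧ (a : Int) ≠ j then (t.1, t.2.1, t.2.2 ++ [xj]) else t) := by
      intro js j
      unfold imedInner
      rw [List.foldl_append]
      rfl
    have hget : PySem.List.pyGetD lst (m : Int) 0 = lst[m] := by
      rw [PySem.List.pyGetD_natCast, List.getD_eq_getElem _ _ hm]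
    have htake : lst.take (m + 1) = lst.take m ++ [lst[m]] := by
      rw [List.take_add_one, List.getElem?_eq_getElem hm]
      rfl
    rw [hr, hstep, htake]
    simp only [List.countP_append, List.countP_cons, List.countP_nil, hget, zero_add]
    by_cases him : a = m
    · subst him
      simp only [ne_eq, not_true_eq_false, and_false, if_false, lt_irrefl, decide_false,
        decide_true, Bool.false_eq_true, if_true] at ih3 ⊢
      refine ⟨?_, ?_, ?_⟩ <;> first | (split_ifs at ih3 ⊢ <;> omega) | omega
    · have him' : (a : Int) ≠ (m : Int) := by omega
      rcases lt_trichotomy lst[m] lst[a] with h1 | h1 | h1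
      · simp only [h1, (lt_asymm h1 : ¬ lst[a] < lst[m]),
          (ne_of_lt h1 : lst[m] ≠ lst[a]), him', ne_eq, not_false_eq_true, and_true,
          decide_true, decide_false, Bool.false_eq_true, if_true, if_false, false_and,
          List.length_append, List.length_cons, List.length_nil]
        refine ⟨?_, ?_, ?_⟩ <;> first | (split_ifs at ih3 ⊢ <;> omega) | omega
      · simp only [h1, lt_irrefl, decide_true, decide_false, Bool.false_eq_true,
          if_false, him', ne_eq, not_false_eq_true, and_true, if_true,
          List.length_append, List.length_cons, List.length_nil] at ih1 ih2 ih3 ⊢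
        refine ⟨?_, ?_, ?_⟩ <;> first | (split_ifs at ih3 ⊢ <;> omega) | omega
      · simp only [h1, (lt_asymm h1 : ¬ lst[m] < lst[a]),
          (ne_of_gt h1 : lst[m] ≠ lst[a]), him', ne_eq, not_false_eq_true, and_true,
          decide_true, decide_false, Bool.false_eq_true, if_true, if_false, false_and,
          List.length_append, List.length_cons, List.length_nil]
        refine ⟨?_, ?_, ?_⟩ <;> first | (split_ifs at ih3 ⊢ <;> omega) | omega

theorem kloop_any (lowLen highLen : Int) (ks : List Int) :
    imedKLoop lowLen highLen ks
      = ks.any (fun k => decide (highLen - k = lowLen) || decide (lowLen - k = highLen)) := by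
  induction ks with
  | nil => rfl
  | cons k ks ih =>
    simp only [imedKLoop, List.any_cons]
    rw [ih]
    by_cases h1 : highLen - k = lowLen
    · simp [h1]
    · by_cases h2 : lowLen - k = highLen <;> simp [h1, h2]

theorem kloop_iff (L H : Nat) (p : Nat) :
    imedKLoop (L : Int) (H : Int) (PySem.List.pyRange 0 ((p : Int) + 1) 1)
      = decide ((H : Int) - (L : Int) ≤ (p : Int) ∧ (L : Int) - (H : Int) ≤ (p : Int)) := by
  rw [kloop_any]
  by_cases h : (H : Int) - (L : Int) ≤ (p : Int) ∧ (L : Int) - (H : Int) ≤ (p : Int)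
  · rw [decide_eq_true h, List.any_eq_true]
    rcases Int.le_total (L : Int) (H : Int) with hle | hle
    · exact ⟨(H : Int) - (L : Int), by rw [PySem.List.mem_pyRange_one]; omega, by simp⟩
    · refine ⟨(L : Int) - (H : Int), by rw [PySem.List.mem_pyRange_one]; omega, ?_⟩
      simp only [Bool.or_eq_true, decide_eq_true_iff]
      omega
  · rw [decide_eq_false h, List.any_eq_false]
    intro k hk
    rw [PySem.List.mem_pyRange_one] at hk
    simp only [Bool.or_eq_true, decide_eq_true_iff, not_or]
    omega

theorem go_find (lst : List Int) :
    ∀ (k a : Nat), a + k = lst.length →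
      imedGo lst (PySem.List.pyRange (a : Int) (lst.length : Int) 1)
        = (lst.drop a).find? (medQ lst) := by
  intro k
  induction k with
  | zero =>
    intro a ha
    rw [PySem.List.pyRange_one_eq_nil (by omega), List.drop_of_length_le (by omega)]
    rfl
  | succ k ih =>
    intro a ha
    have halt : a < lst.length := by omega
    have hxi : PySem.List.pyGetD lst (a : Int) 0 = lst[a] := by
      rw [PySem.List.pyGetD_natCast, List.getD_eq_getElem _ _ halt]
    obtain ⟨hL, hH, hE⟩ := inner_len lst a halt lst.length (le_refl _)
    simp only [List.take_length] at hL hH hE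
    rw [if_pos halt] at hE
    rw [PySem.List.pyRange_one_cons (by omega)]
    simp only [imedGo, hxi]
    rw [kloop_iff]
    have hmq : decide
        (((imedInner lst (↑a) lst[a] (PySem.List.pyRange 0 (lst.length : Int) 1)).2.1.length : Int)
          - ((imedInner lst (↑a) lst[a] (PySem.List.pyRange 0 (lst.length : Int) 1)).1.length : Int)
          ≤ ((imedInner lst (↑a) lst[a] (PySem.List.pyRange 0 (lst.length : Int) 1)).2.2.length : Int) ∧
         ((imedInner lst (↑a) lst[a] (PySem.List.pyRange 0 (lst.length : Int) 1)).1.length : Int)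
          - ((imedInner lst (↑a) lst[a] (PySem.List.pyRange 0 (lst.length : Int) 1)).2.1.length : Int)
          ≤ ((imedInner lst (↑a) lst[a] (PySem.List.pyRange 0 (lst.length : Int) 1)).2.2.length : Int))
        = medQ lst lst[a] := by
      unfold medQ
      rw [decide_eq_decide, hL, hH]
      omega
    rw [hmq]
    have hdrop : lst.drop a = lst[a] :: lst.drop (a + 1) := by
      rw [List.getElem_cons_drop]
    rw [hdrop, List.find?_cons]
    have hc : ((a : Int) + 1) = ((a + 1 : Nat) : Int) := by push_cast; ring
    rcases hq : medQ lst lst[a] with _ | _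
    · simp only [Bool.false_eq_true, if_false]
      rw [hc, ih (a + 1) (by omega)]
    · simp

-- counting split lemmas
theorem cnt_le_split (l : List Int) (x : Int) :
    l.countP (fun y => decide (y ≤ x))
      = l.countP (fun y => decide (y < x)) + l.countP (fun y => decide (y = x)) := by
  induction l with
  | nil => rfl
  | cons hd t ih =>
    simp only [List.countP_cons, ih]
    rcases lt_trichotomy hd x with h1 | h1 | h1
    · simp [le_of_lt h1, h1, (ne_of_lt h1 : hd ≠ x)]; omega
    · subst h1
      simp; omega
    · simp [(not_le_of_gt h1 : ¬ hd ≤ x), (lt_asymm h1 : ¬ hd < x),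
        (ne_of_gt h1 : hd ≠ x)]

theorem cnt_total (l : List Int) (x : Int) :
    l.countP (fun y => decide (y < x)) + l.countP (fun y => decide (y = x))
      + l.countP (fun y => decide (x < y)) = l.length := by
  induction l with
  | nil => rfl
  | cons hd t ih =>
    simp only [List.countP_cons, List.length_cons]
    rcases lt_trichotomy hd x with h1 | h1 | h1
    · simp [h1, (ne_of_lt h1 : hd ≠ x), (lt_asymm h1 : ¬ x < hd)]; omega
    · subst h1
      simp; omega
    · simp [h1, (ne_of_gt h1 : hd ≠ x), (lt_asymm h1 : ¬ hd < x)]; omega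

theorem sorted_mono (s : List Int) (hpw : s.Pairwise (· ≤ ·)) {p q : Nat}
    (hpq : p ≤ q) (hq : q < s.length) : s[p]'(by omega) ≤ s[q] := by
  rcases Nat.lt_or_ge p q with h | h
  · exact List.pairwise_iff_getElem.mp hpw p q (by omega) hq h
  · have hpq' : p = q := by omega
    subst hpq'
    exact le_refl _

theorem countP_take_drop (s : List Int) (p : Int → Bool) (m : Nat) :
    s.countP p = (s.take m).countP p + (s.drop m).countP p := by
  conv_lhs => rw [← List.take_append_drop m s]
  rw [List.countP_append]

-- on a ≤-sorted list s, #(< s[m]) ≤ m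
theorem cnt_lt_le (s : List Int) (hpw : s.Pairwise (· ≤ ·)) (m : Nat) (hm : m < s.length) :
    s.countP (fun y => decide (y < s[m])) ≤ m := by
  rw [countP_take_drop s _ m]
  have hdrop : (s.drop m).countP (fun y => decide (y < s[m])) = 0 := by
    rw [List.countP_eq_zero]
    intro y hy
    obtain ⟨k, hk, hky⟩ := List.mem_iff_getElem.mp hy
    have hk' : m + k < s.length := by
      have := List.length_drop (l := s) (i := m); omega
    rw [List.getElem_drop] at hky
    have hle : s[m] ≤ s[m + k] := sorted_mono s hpw (by omega) hk'
    subst hky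
    simp only [decide_eq_true_iff, not_lt]
    exact hle
  have htake : (s.take m).countP (fun y => decide (y < s[m])) ≤ m :=
    le_trans List.countP_le_length (by rw [List.length_take]; omega)
  omega

-- on a ≤-sorted list s, m+1 ≤ #(≤ s[m])
theorem cnt_le_ge (s : List Int) (hpw : s.Pairwise (· ≤ ·)) (m : Nat) (hm : m < s.length) :
    m + 1 ≤ s.countP (fun y => decide (y ≤ s[m])) := by
  rw [countP_take_drop s _ (m + 1)]
  have htake : (s.take (m + 1)).countP (fun y => decide (y ≤ s[m])) = m + 1 := by
    rw [List.countP_eq_length.mpr, List.length_take]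
    · omega
    · intro y hy
      obtain ⟨k, hk, hky⟩ := List.mem_iff_getElem.mp hy
      rw [List.getElem_take] at hky
      have hkm : k ≤ m := by rw [List.length_take] at hk; omega
      subst hky
      simp only [decide_eq_true_iff]
      exact sorted_mono s hpw hkm hm
  omega

-- conversely the counts pin down s[m]
theorem eq_of_cnt (s : List Int) (hpw : s.Pairwise (· ≤ ·)) (m : Nat) (hm : m < s.length)
    (x : Int) (h1 : s.countP (fun y => decide (y < x)) ≤ m)
    (h2 : m + 1 ≤ s.countP (fun y => decide (y < x)) + s.countP (fun y => decide (y = x))) :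
    s[m] = x := by
  rcases lt_trichotomy s[m] x with hlt | heq | hgt
  · exfalso
    have htake : (s.take (m + 1)).countP (fun y => decide (y < x)) = m + 1 := by
      rw [List.countP_eq_length.mpr, List.length_take]
      · omega
      · intro y hy
        obtain ⟨k, hk, hky⟩ := List.mem_iff_getElem.mp hy
        rw [List.getElem_take] at hky
        have hkm : k ≤ m := by rw [List.length_take] at hk; omega
        subst hky
        simp only [decide_eq_true_iff]
        exact lt_of_le_of_lt (sorted_mono s hpw hkm hm) hlt
    have := countP_take_drop s (fun y => decide (y < x)) (m + 1)
    omega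
  · exact heq
  · exfalso
    have hsp := cnt_le_split s x
    have hdrop : (s.drop m).countP (fun y => decide (y ≤ x)) = 0 := by
      rw [List.countP_eq_zero]
      intro y hy
      obtain ⟨k, hk, hky⟩ := List.mem_iff_getElem.mp hy
      have hk' : m + k < s.length := by
        have := List.length_drop (l := s) (i := m); omega
      rw [List.getElem_drop] at hky
      have hle : s[m] ≤ s[m + k] := sorted_mono s hpw (by omega) hk'
      subst hky
      simp only [decide_eq_true_iff, not_le]
      exact lt_of_lt_of_le hgt hle
    have htake : (s.take m).countP (fun y => decide (y ≤ x)) ≤ m :=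
      le_trans List.countP_le_length (by rw [List.length_take]; omega)
    have := countP_take_drop s (fun y => decide (y ≤ x)) m
    omega

theorem find_unique {p : Int → Bool} {v : Int} :
    ∀ l : List Int, p v = true → v ∈ l → (∀ x, p x = true → x = v) → l.find? p = some v
  | [], _, hv, _ => by simp at hv
  | h :: t, hp, hv, huniq => by
    by_cases hh : p h = true
    · rw [List.find?_cons_of_pos hh, huniq h hh]
    · have hvne : v ≠ h := fun he => hh (he ▸ hp)
      rw [List.find?_cons_of_neg (by simp [hh])]
      exact find_unique t hp (List.mem_of_ne_of_mem hvne hv) huniq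

-- medQ characterised by the two middle elements of the sorted list
theorem medQ_char (lst : List Int) (x : Int)
    (s : List Int) (hs : s = PySem.List.sorted lst (fun x => x) false)
    (hlo : (lst.length - 1) / 2 < s.length) (hhi : lst.length / 2 < s.length) :
    medQ lst x = true ↔ (s[(lst.length - 1) / 2] = x ∧ s[lst.length / 2] = x) := by
  have hperm : s.Perm lst := hs ▸ PySem.List.sorted_perm lst (fun x => x) false
  have hpw : s.Pairwise (· ≤ ·) := hs ▸ PySem.List.sorted_pairwise lst (fun x => x)
  have hlen : s.length = lst.length := hperm.length_eq
  have hcL := hperm.countP_eq (fun y => decide (y < x))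
  have hcE := hperm.countP_eq (fun y => decide (y = x))
  have hcH := hperm.countP_eq (fun y => decide (x < y))
  have htot := cnt_total s x
  unfold medQ
  rw [decide_eq_true_iff]
  constructor
  · intro h
    obtain ⟨ha1, ha2⟩ := h
    constructor
    · exact eq_of_cnt s hpw _ hlo x (by omega) (by omega)
    · exact eq_of_cnt s hpw _ hhi x (by omega) (by omega)
  · rintro ⟨h1, h2⟩
    have hle := cnt_lt_le s hpw _ hlo
    have hge := cnt_le_ge s hpw _ hhi
    rw [h1] at hle
    rw [h2, cnt_le_split] at hge
    omega

theorem find_eq_alt (lst : List Int) : lst.find? (medQ lst) = iterable_median_alt lst := by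
  by_cases hne : lst = []
  · subst hne
    simp [iterable_median_alt]
  · have hn1 : 1 ≤ lst.length := List.length_pos_iff.mpr hne
    have hlen : (PySem.List.sorted lst (fun x => x) false).length = lst.length :=
      (PySem.List.sorted_perm lst (fun x => x) false).length_eq
    have hlo : (lst.length - 1) / 2 < (PySem.List.sorted lst (fun x => x) false).length := by omega
    have hhi : lst.length / 2 < (PySem.List.sorted lst (fun x => x) false).length := by omega
    have hfd1 : PySem.Int.floordiv (((PySem.List.sorted lst (fun x => x) false).length : Int) - 1) 2
        = (((lst.length - 1) / 2 : Nat) : Int) := by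
      rw [PySem.Int.floordiv_eq_ediv_of_pos (by norm_num)]
      omega
    have hfd2 : PySem.Int.floordiv ((PySem.List.sorted lst (fun x => x) false).length : Int) 2
        = ((lst.length / 2 : Nat) : Int) := by
      rw [PySem.Int.floordiv_eq_ediv_of_pos (by norm_num)]
      omega
    have hg1 : PySem.List.pyGetD (PySem.List.sorted lst (fun x => x) false)
        (PySem.Int.floordiv (((PySem.List.sorted lst (fun x => x) false).length : Int) - 1) 2) 0
        = (PySem.List.sorted lst (fun x => x) false)[(lst.length - 1) / 2] := by
      rw [hfd1, PySem.List.pyGetD_natCast, List.getD_eq_getElem _ _ hlo]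
    have hg2 : PySem.List.pyGetD (PySem.List.sorted lst (fun x => x) false)
        (PySem.Int.floordiv ((PySem.List.sorted lst (fun x => x) false).length : Int) 2) 0
        = (PySem.List.sorted lst (fun x => x) false)[lst.length / 2] := by
      rw [hfd2, PySem.List.pyGetD_natCast, List.getD_eq_getElem _ _ hhi]
    have hchar := medQ_char lst
    unfold iterable_median_alt
    simp only [hne, if_false, hg1, hg2]
    by_cases heq : (PySem.List.sorted lst (fun x => x) false)[(lst.length - 1) / 2]
        = (PySem.List.sorted lst (fun x => x) false)[lst.length / 2]
    · rw [if_pos heq]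
      apply find_unique lst
      · exact (hchar _ _ rfl hlo hhi).mpr ⟨rfl, heq.symm⟩
      · exact (PySem.List.sorted_perm lst (fun x => x) false).mem_iff.mp (List.getElem_mem hlo)
      · intro y hy
        exact ((hchar y _ rfl hlo hhi).mp hy).1.symm
    · rw [if_neg heq]
      rw [List.find?_eq_none]
      intro y _ hy
      obtain ⟨e1, e2⟩ := (hchar y _ rfl hlo hhi).mp hy
      exact heq (e1.trans e2.symm)

-- ===== VERDICT (by name: the statement is the Claim_ definition above) =====
theorem iterable_median_spec : Claim_equal_iterable_median := by
  intro lst _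
  unfold Spec_iterable_median iterable_median
  rw [show (0 : Int) = ((0 : Nat) : Int) from rfl, go_find lst lst.length 0 (by omega)]
  simpa using find_eq_alt lst
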